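-- pv_equiv track=rewrite | github.com/eliottcassidy2000/math | 04-computation/cutflip_formula.py | cut_flip_vertex
-- ===== SOURCE A (Python) =====
-- def cut_flip_vertex(T, v):
--     """Flip all arcs through vertex v."""
--     n = len(T)
--     T_new = [row[:] for row in T]
--     for u in range(n):
--         if u == v:
--             continue
--         T_new[v][u] = 1 - T[v][u]
--         T_new[u][v] = 1 - T[u][v]
--     return T_new
-- ===== SOURCE B (Python) =====
-- def cut_flip_vertex(T, v):
--     """Flip all arcs through vertex v (two staged passes)."""
--     n = len(T)
--     if n == 0:
--         return []
--     w = range(n)[v]  # normalise the vertex index; IndexError if out of range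
--     # stage 1: flip the whole pivot row
--     rows = [[1 - x for x in row] if i == w else row for i, row in enumerate(T)]
--     # stage 2: flip the whole pivot column; the diagonal cell is flipped twice,
--     # so 1 - (1 - x) = x restores it without any special case
--     return [[1 - x if j == w else x for j, x in enumerate(row)] for row in rows]
-- ===== Notes on version B (the rewrite author's own statement) =====
-- stated objective: alternative
-- what changed: B computes the flip in two staged whole-matrix passes -- first flip every entry of the pivot row, then flip every entry of the pivot column -- letting the diagonal cell cancel by being flipped twice, instead of A's copy-everything-then-patch loop that assigns into the v-th row and column cell by cell.
-- intended difference: For nonempty T with negative in-range v, A returns a matrix whose diagonal entry T[v][v] is also flipped (the u == v guard never fires; on ragged rows A's negative indices also hit row-length-relative columns), and for a v-th row longer than len(T), A flips only its first len(T) entries; B flips exactly the off-diagonal cells of row v and column v, the intended arc flip through vertex v. — e.g. on cut_flip_vertex([[0, 1], [1, 0]], -2): A returns [[1, 0], [0, 0]], B returns [[0, 0], [0, 0]]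
import Mathlib
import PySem

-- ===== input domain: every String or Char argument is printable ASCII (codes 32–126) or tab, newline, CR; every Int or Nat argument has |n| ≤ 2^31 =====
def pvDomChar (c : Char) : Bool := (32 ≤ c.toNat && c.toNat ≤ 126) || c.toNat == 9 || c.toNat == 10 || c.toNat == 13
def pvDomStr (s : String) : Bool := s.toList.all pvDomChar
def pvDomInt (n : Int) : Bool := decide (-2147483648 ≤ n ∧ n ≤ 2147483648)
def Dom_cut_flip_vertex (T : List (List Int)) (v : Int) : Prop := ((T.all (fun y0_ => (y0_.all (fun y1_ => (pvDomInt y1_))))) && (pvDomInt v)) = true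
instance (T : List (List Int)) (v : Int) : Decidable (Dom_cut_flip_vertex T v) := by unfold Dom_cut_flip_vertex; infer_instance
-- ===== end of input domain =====

-- B computes the flip in two staged whole-matrix passes — flip every entry of the pivot row,
-- then flip every entry of the pivot column, the diagonal cell cancelling by being flipped
-- twice — instead of A's copy-then-patch loop assigning into row v and column v; same cost,
-- and B leaves the diagonal alone for negative v where A's `u == v` guard misses (see D_).

-- ===== PORT A =====
-- The loop body of A, named so the fold can be reasoned about; pyGetD/pySetD are exact Python
-- indexing/assignment (incl. negative wraparound) whenever the index is in range, which
-- Pre_ guarantees here.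
def flipStep (T : List (List Int)) (v : Int) (Tn : List (List Int)) (u : Int) : List (List Int) :=
  if u = v then Tn
  else
    let Tn' := PySem.List.pySetD Tn v
      (PySem.List.pySetD (PySem.List.pyGetD Tn v [])
        u (1 - PySem.List.pyGetD (PySem.List.pyGetD T v []) u 0))
    PySem.List.pySetD Tn' u
      (PySem.List.pySetD (PySem.List.pyGetD Tn' u [])
        v (1 - PySem.List.pyGetD (PySem.List.pyGetD T u []) v 0))

def cut_flip_vertex (T : List (List Int)) (v : Int) : List (List Int) :=
  let n : Int := T.length
  let Tnew : List (List Int) := T.map (fun row => row)   -- row[:] copies each row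
  (PySem.List.pyRange 0 n 1).foldl (flipStep T v) Tnew

-- ===== PORT B =====
def cut_flip_vertex_alt (T : List (List Int)) (v : Int) : List (List Int) :=
  let n : Int := T.length
  if n = 0 then []
  else
    match PySem.List.pyGet? (PySem.List.pyRange 0 n 1) v with
    | none => []   -- range(n)[v] raises IndexError in Python (outside Pre_)
    | some w =>
      -- stage 1: flip the whole pivot row
      let rows := (PySem.List.enumerate T 0).map (fun ir =>
        if ir.1 == w then ir.2.map (fun x => 1 - x) else ir.2)
      -- stage 2: flip the whole pivot column (the diagonal cell, flipped twice, is restored)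
      rows.map (fun row => (PySem.List.enumerate row 0).map (fun jx =>
        if jx.1 == w then 1 - jx.2 else jx.2))

-- ===== PRECONDITION & SPEC =====
-- Pre_ is exactly the set of inputs on which A returns normally: every index A writes or
-- reads (row v, and entry v of every other row, Python-negative indices included) is in
-- range; elsewhere A raises IndexError.
def Pre_cut_flip_vertex (T : List (List Int)) (v : Int) : Prop :=
  T = [] ∨
  (0 ≤ v ∧ v < (T.length : Int) ∧ ∀ u : Nat, u < T.length → (u : Int) ≠ v →
      (u < (T.getD v.toNat []).length ∧ v < ((T.getD u []).length : Int))) ∨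
  (-(T.length : Int) ≤ v ∧ v < 0 ∧ ∀ u : Nat, u < T.length →
      (u < (T.getD (v + T.length).toNat []).length ∧ -v ≤ ((T.getD u []).length : Int)))
instance (T : List (List Int)) (v : Int) : Decidable (Pre_cut_flip_vertex T v) := by
  unfold Pre_cut_flip_vertex; infer_instance
def pvWitness_cut_flip_vertex : List (List Int) × Int := ([[0, 1, 0], [1, 0, 1], [0, 1, 0]], 2)

-- For negative in-range v, A's guard `u == v` never fires (u is nonnegative), so A also
-- flips the diagonal entry T[v][v] (and, in ragged rows, row-length-relative columns); for a
-- v-th row longer than len(T), A flips only its first len(T) entries.  B flips exactly the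
-- off-diagonal cells of row v and column v, which is the intended arc flip through vertex v.
def D_cut_flip_vertex (T : List (List Int)) (v : Int) : Prop :=
  T ≠ [] ∧ ((-(T.length : Int) ≤ v ∧ v < 0) ∨
    (0 ≤ v ∧ v < (T.length : Int) ∧ T.length < (T.getD v.toNat []).length))
instance (T : List (List Int)) (v : Int) : Decidable (D_cut_flip_vertex T v) := by
  unfold D_cut_flip_vertex; infer_instance

def Spec_cut_flip_vertex (T : List (List Int)) (v : Int) (out : List (List Int)) : Prop :=
  ¬ D_cut_flip_vertex T v → out = cut_flip_vertex_alt T v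
instance (T : List (List Int)) (v : Int) (out : List (List Int)) : Decidable (Spec_cut_flip_vertex T v out) := by
  unfold Spec_cut_flip_vertex; infer_instance

def pvDiffWitness_cut_flip_vertex : List (List Int) × Int := ([[0, 1], [1, 0]], -2)
def pvDiffWitnessOut_cut_flip_vertex : (List (List Int)) × (List (List Int)) :=
  ([[1, 0], [0, 0]], [[0, 0], [0, 0]])

-- ===== CLAIM (what is proved, stated in full; the proofs are below) =====
def Claim_unchanged_cut_flip_vertex : Prop := ∀ (T : List (List Int)) (v : Int), Dom_cut_flip_vertex T v → Pre_cut_flip_vertex T v → Spec_cut_flip_vertex T v (cut_flip_vertex T v)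
def Claim_changed_cut_flip_vertex : Prop := Dom_cut_flip_vertex (pvDiffWitness_cut_flip_vertex.1) (pvDiffWitness_cut_flip_vertex.2) ∧ Pre_cut_flip_vertex (pvDiffWitness_cut_flip_vertex.1) (pvDiffWitness_cut_flip_vertex.2) ∧ D_cut_flip_vertex (pvDiffWitness_cut_flip_vertex.1) (pvDiffWitness_cut_flip_vertex.2) ∧ cut_flip_vertex (pvDiffWitness_cut_flip_vertex.1) (pvDiffWitness_cut_flip_vertex.2) = pvDiffWitnessOut_cut_flip_vertex.1 ∧ cut_flip_vertex_alt (pvDiffWitness_cut_flip_vertex.1) (pvDiffWitness_cut_flip_vertex.2) = pvDiffWitnessOut_cut_flip_vertex.2 ∧ pvDiffWitnessOut_cut_flip_vertex.1 ≠ pvDiffWitnessOut_cut_flip_vertex.2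
def Claim_exact_cut_flip_vertex : Prop := ∀ (T : List (List Int)) (v : Int), Dom_cut_flip_vertex T v → Pre_cut_flip_vertex T v → D_cut_flip_vertex T v → cut_flip_vertex T v ≠ cut_flip_vertex_alt T v

-- ===== LEMMAS AND PROOFS =====

-- Python index normalisation: the Nat index an in-range Int index i denotes in a list of length len.
def wrapIdx (len : Nat) (i : Int) : Nat := if 0 ≤ i then i.toNat else len - (-i).toNat

-- cell access used throughout the proofs
def cellD (M : List (List Int)) (i j : Nat) : Int := (M.getD i []).getD j 0

theorem getD_set_of_lt {α : Type} (xs : List α) (a i : Nat) (y d : α) (ha : a < xs.length) :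
    (xs.set a y).getD i d = if i = a then y else xs.getD i d := by
  by_cases h : i = a
  · subst h
    simp [List.getD_eq_getElem?_getD, ha]
  · have h' : ¬ a = i := fun hh => h hh.symm
    simp only [List.getD_eq_getElem?_getD, List.getElem?_set, if_neg h']
    rw [if_neg h]
theorem pyGetD_wrap {α : Type} (xs : List α) (i : Int) (d : α)
    (h1 : -(xs.length : Int) ≤ i) (h2 : i < (xs.length : Int)) :
    PySem.List.pyGetD xs i d = xs.getD (wrapIdx xs.length i) d := by
  unfold PySem.List.pyGetD PySem.List.pyGet? PySem.List.pyIdx? wrapIdx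
  by_cases h : 0 ≤ i
  · rw [if_pos h, if_pos h, if_pos h2]
    simp [List.getD_eq_getElem?_getD]
  · rw [if_neg h, if_neg h, if_pos h1]
    simp [List.getD_eq_getElem?_getD]
theorem pySetD_wrap {α : Type} (xs : List α) (i : Int) (y : α)
    (h1 : -(xs.length : Int) ≤ i) (h2 : i < (xs.length : Int)) :
    PySem.List.pySetD xs i y = xs.set (wrapIdx xs.length i) y := by
  unfold PySem.List.pySetD PySem.List.pySet? PySem.List.pyIdx? wrapIdx
  by_cases h : 0 ≤ i
  · rw [if_pos h, if_pos h, if_pos h2]; rfl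
  · rw [if_neg h, if_neg h, if_pos h1]; rfl

-- Invariant of A's loop for a nonnegative pivot; row lengths may vary as long as every row
-- reaches past column v.
theorem A_inv2 (T : List (List Int)) (v : Int) (w : Nat) (hv : v = (w : Int))
    (hw : w < T.length)
    (hrv : ∀ u, u < T.length → ¬ u = w → u < (T.getD w []).length)
    (hcol : ∀ i, i < T.length → ¬ i = w → w < (T.getD i []).length)
    (k : Nat) (hk : k ≤ T.length) :
    (((List.range k).map (fun j => ((j : Nat) : Int))).foldl (flipStep T v) T).length = T.length ∧
    (∀ i, ((((List.range k).map (fun j => ((j : Nat) : Int))).foldl (flipStep T v) T).getD i []).length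
        = (T.getD i []).length) ∧
    (∀ i j, i < T.length → j < (T.getD i []).length →
      cellD (((List.range k).map (fun j => ((j : Nat) : Int))).foldl (flipStep T v) T) i j
        = if (i = w ∧ ¬(j = w) ∧ j < k) ∨ (j = w ∧ ¬(i = w) ∧ i < k)
          then 1 - cellD T i j else cellD T i j) := by
  subst hv
  induction k with
  | zero =>
    refine ⟨rfl, fun i => rfl, ?_⟩
    intro i j hi hj
    rw [if_neg (by omega)]
    rfl
  | succ k ihk =>
    obtain ⟨ih1, ih2, ih3⟩ := ihk (by omega)
    rw [List.range_succ, List.map_append, List.foldl_append] at *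
    set R := ((List.range k).map (fun j => ((j : Nat) : Int))).foldl (flipStep T (w : Int)) T with hR
    simp only [List.map_cons, List.map_nil, List.foldl_cons, List.foldl_nil]
    have hkn : (k : Nat) < T.length := by omega
    have hwk : ∀ len : Nat, wrapIdx len ((k : Nat) : Int) = k := by
      intro len; unfold wrapIdx; rw [if_pos (by omega)]; omega
    have hww : ∀ len : Nat, wrapIdx len ((w : Nat) : Int) = w := by
      intro len; unfold wrapIdx; rw [if_pos (by omega)]; omega
    by_cases hkv : ((k : Nat) : Int) = ((w : Nat) : Int)
    · rw [show flipStep T (w : Int) R ((k : Nat) : Int) = R from by unfold flipStep; rw [if_pos hkv]]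
      refine ⟨ih1, ih2, ?_⟩
      intro i j hi hj
      rw [ih3 i j hi hj]
      exact if_congr (by omega) rfl rfl
    · have hkw : ¬ (k : Nat) = w := by omega
      have hstep : flipStep T (w : Int) R ((k : Nat) : Int)
          = (R.set w ((R.getD w []).set k (1 - (T.getD w []).getD k 0))).set k
              (((R.set w ((R.getD w []).set k (1 - (T.getD w []).getD k 0))).getD k []).set w
                (1 - (T.getD k []).getD w 0)) := by
        simp only [flipStep]
        rw [if_neg hkv]
        rw [pyGetD_wrap T ((w : Nat) : Int) [] (by omega) (by omega), hww]
        rw [pyGetD_wrap R ((w : Nat) : Int) [] (by rw [ih1]; omega) (by rw [ih1]; omega)]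
        rw [hww]
        rw [pyGetD_wrap (T.getD w []) _ 0 (by have := hrv k hkn hkw; omega)
             (by have := hrv k hkn hkw; omega), hwk]
        rw [pySetD_wrap (R.getD w []) _ _ (by rw [ih2 w]; have := hrv k hkn hkw; omega)
             (by rw [ih2 w]; have := hrv k hkn hkw; omega), hwk]
        rw [pySetD_wrap R ((w : Nat) : Int) _ (by rw [ih1]; omega) (by rw [ih1]; omega), hww]
        set R1 := R.set w ((R.getD w []).set k (1 - (T.getD w []).getD k 0)) with hR1
        have hR1len : R1.length = T.length := by rw [hR1, List.length_set, ih1]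
        have hR1row : (R1.getD k []).length = (T.getD k []).length := by
          rw [hR1, getD_set_of_lt _ _ _ _ _ (by rw [ih1]; omega), if_neg hkw]
          exact ih2 k
        rw [pyGetD_wrap R1 _ [] (by rw [hR1len]; omega) (by rw [hR1len]; omega), hwk]
        rw [pyGetD_wrap T ((k : Nat) : Int) [] (by omega) (by omega), hwk]
        rw [pyGetD_wrap (T.getD k []) ((w : Nat) : Int) 0
             (by have := hcol k hkn hkw; omega) (by have := hcol k hkn hkw; omega), hww]
        rw [pySetD_wrap (R1.getD k []) ((w : Nat) : Int) _
             (by rw [hR1row]; have := hcol k hkn hkw; omega)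
             (by rw [hR1row]; have := hcol k hkn hkw; omega), hww]
        rw [pySetD_wrap R1 _ _ (by rw [hR1len]; omega) (by rw [hR1len]; omega), hwk]
      rw [hstep]
      set R1 := R.set w ((R.getD w []).set k (1 - (T.getD w []).getD k 0)) with hR1
      have hR1len : R1.length = T.length := by rw [hR1, List.length_set, ih1]
      set M2 := R1.set k ((R1.getD k []).set w (1 - (T.getD k []).getD w 0)) with hM2
      have hM2len : M2.length = T.length := by rw [hM2, List.length_set, hR1len]
      have hR1row : ∀ i, (R1.getD i []).length = (T.getD i []).length := by
        intro i
        rw [hR1, getD_set_of_lt _ _ _ _ _ (by rw [ih1]; omega)]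
        by_cases h : i = w
        · rw [if_pos h, List.length_set, ih2 w, h]
        · rw [if_neg h]; exact ih2 i
      have hM2row : ∀ i, (M2.getD i []).length = (T.getD i []).length := by
        intro i
        rw [hM2, getD_set_of_lt _ _ _ _ _ (by rw [hR1len]; omega)]
        by_cases h : i = k
        · rw [if_pos h, List.length_set, hR1row k, h]
        · rw [if_neg h]; exact hR1row i
      refine ⟨hM2len, hM2row, ?_⟩
      intro i j hi hj
      have hcell : cellD M2 i j
          = if i = k ∧ j = w then 1 - cellD T i j
            else if i = w ∧ j = k then 1 - cellD T i j
            else cellD R i j := by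
        unfold cellD
        rw [hM2, getD_set_of_lt _ _ _ _ _ (by rw [hR1len]; omega)]
        by_cases hik : i = k
        · rw [if_pos hik]
          rw [getD_set_of_lt _ _ _ _ _ (by rw [hR1row k]; have := hcol k hkn hkw; omega)]
          by_cases hjw : j = w
          · rw [if_pos hjw, if_pos ⟨hik, hjw⟩, hik, hjw]
          · rw [if_neg hjw, if_neg (fun h => hjw h.2)]
            rw [hR1, getD_set_of_lt _ _ _ _ _ (by rw [ih1]; omega)]
            rw [if_neg (by omega), if_neg (by intro h; exact hkw (by omega))]
            rw [hik]
        · rw [if_neg hik]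
          rw [hR1, getD_set_of_lt _ _ _ _ _ (by rw [ih1]; omega)]
          by_cases hiw : i = w
          · rw [if_pos hiw]
            rw [getD_set_of_lt _ _ _ _ _ (by rw [ih2 w]; have := hrv k hkn hkw; omega)]
            by_cases hjk : j = k
            · rw [if_pos hjk, if_neg (fun h => hik h.1), if_pos ⟨hiw, hjk⟩, hiw, hjk]
            · rw [if_neg hjk, if_neg (fun h => hik h.1), if_neg (fun h => hjk h.2), hiw]
          · rw [if_neg hiw, if_neg (fun h => hik h.1), if_neg (fun h => hiw h.1)]
      rw [hcell, ih3 i j hi hj]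
      split_ifs <;> omega

-- Final characterisation of port A for a nonnegative pivot on (possibly ragged) Pre_ inputs.
theorem A_char2 (T : List (List Int)) (v : Int) (w : Nat) (hv : v = (w : Int))
    (hw : w < T.length)
    (hrv : ∀ u, u < T.length → ¬ u = w → u < (T.getD w []).length)
    (hcol : ∀ i, i < T.length → ¬ i = w → w < (T.getD i []).length)
    (hle : (T.getD w []).length ≤ T.length) :
    (cut_flip_vertex T v).length = T.length ∧
    (∀ i, ((cut_flip_vertex T v).getD i []).length = (T.getD i []).length) ∧
    (∀ i j, i < T.length → j < (T.getD i []).length →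
      cellD (cut_flip_vertex T v) i j
        = if (i = w ∧ ¬(j = w)) ∨ (j = w ∧ ¬(i = w))
          then 1 - cellD T i j else cellD T i j) := by
  have hA : cut_flip_vertex T v
      = ((List.range T.length).map (fun j => ((j : Nat) : Int))).foldl (flipStep T v) T := by
    simp only [cut_flip_vertex]
    rw [PySem.List.pyRange_one]
    simp [List.map_id']
  obtain ⟨h1, h2, h3⟩ := A_inv2 T v w hv hw hrv hcol T.length le_rfl
  rw [hA]
  refine ⟨h1, h2, ?_⟩
  intro i j hi hj
  rw [h3 i j hi hj]
  have hjw : i = w → j < T.length := fun h => by rw [h] at hj; omega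
  exact if_congr (by omega) rfl rfl


-- For negative in-range v, the diagonal cell (w,w) (w = v + len(T)) ends up flipped: the
-- guard `u == v` never fires, and every write into it writes 1 - T[w][w].
theorem A_diag (T : List (List Int)) (v : Int) (w : Nat)
    (hlo : -(T.length : Int) ≤ v) (hneg : v < 0)
    (hv : ((w : Nat) : Int) = v + T.length) (hw : w < T.length)
    (hLw : T.length ≤ (T.getD w []).length)
    (hcols : ∀ u, u < T.length → -v ≤ ((T.getD u []).length : Int)) :
    (cut_flip_vertex T v).length = T.length ∧
    (∀ i, ((cut_flip_vertex T v).getD i []).length = (T.getD i []).length) ∧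
    cellD (cut_flip_vertex T v) w w = if w < T.length then 1 - cellD T w w else cellD T w w := by
  have hA0 : cut_flip_vertex T v
      = ((List.range T.length).map (fun j => ((j : Nat) : Int))).foldl (flipStep T v) T := by
    simp only [cut_flip_vertex]
    rw [PySem.List.pyRange_one]
    simp [List.map_id']
  rw [hA0]
  have hwrap : ∀ len : Nat, len = T.length → wrapIdx len v = w := by
    intro len h; unfold wrapIdx; rw [if_neg (by omega)]; omega
  have main : ∀ k : Nat, k ≤ T.length →
      (((List.range k).map (fun j => ((j : Nat) : Int))).foldl (flipStep T v) T).length = T.length ∧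
      (∀ i, ((((List.range k).map (fun j => ((j : Nat) : Int))).foldl (flipStep T v) T).getD i []).length
          = (T.getD i []).length) ∧
      cellD (((List.range k).map (fun j => ((j : Nat) : Int))).foldl (flipStep T v) T) w w
        = if w < k then 1 - cellD T w w else cellD T w w := by
    intro k
    induction k with
    | zero =>
      intro _
      refine ⟨rfl, fun i => rfl, ?_⟩
      rw [if_neg (by omega)]
      rfl
    | succ k ihk =>
      intro hk
      obtain ⟨ih1, ih2, ih3⟩ := ihk (by omega)
      rw [List.range_succ, List.map_append, List.foldl_append]
      set R := ((List.range k).map (fun j => ((j : Nat) : Int))).foldl (flipStep T v) T with hR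
      simp only [List.map_cons, List.map_nil, List.foldl_cons, List.foldl_nil]
      have hkn : (k : Nat) < T.length := by omega
      have hwk : ∀ len : Nat, wrapIdx len ((k : Nat) : Int) = k := by
        intro len; unfold wrapIdx; rw [if_pos (by omega)]; omega
      have hkv : ¬ ((k : Nat) : Int) = v := by omega
      have hstep : flipStep T v R ((k : Nat) : Int)
          = (R.set w ((R.getD w []).set k (1 - (T.getD w []).getD k 0))).set k
              (((R.set w ((R.getD w []).set k (1 - (T.getD w []).getD k 0))).getD k []).set
                (wrapIdx (T.getD k []).length v)
                (1 - (T.getD k []).getD (wrapIdx (T.getD k []).length v) 0)) := by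
        simp only [flipStep]
        rw [if_neg hkv]
        rw [pyGetD_wrap T v [] (by omega) (by omega), hwrap _ rfl]
        rw [pyGetD_wrap R v [] (by rw [ih1]; omega) (by rw [ih1]; omega), hwrap _ ih1]
        rw [pyGetD_wrap (T.getD w []) _ 0 (by omega) (by omega), hwk]
        rw [pySetD_wrap (R.getD w []) _ _ (by rw [ih2 w]; omega) (by rw [ih2 w]; omega), hwk]
        rw [pySetD_wrap R v _ (by rw [ih1]; omega) (by rw [ih1]; omega), hwrap _ ih1]
        set R1 := R.set w ((R.getD w []).set k (1 - (T.getD w []).getD k 0)) with hR1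
        have hR1len : R1.length = T.length := by rw [hR1, List.length_set, ih1]
        have hR1row : (R1.getD k []).length = (T.getD k []).length := by
          rw [hR1, getD_set_of_lt _ _ _ _ _ (by rw [ih1]; omega)]
          by_cases h : (k : Nat) = w
          · rw [if_pos h, List.length_set, ih2 w, h]
          · rw [if_neg h]; exact ih2 k
        have hck := hcols k hkn
        rw [pyGetD_wrap R1 _ [] (by rw [hR1len]; omega) (by rw [hR1len]; omega), hwk]
        rw [pyGetD_wrap T ((k : Nat) : Int) [] (by omega) (by omega), hwk]
        rw [pyGetD_wrap (T.getD k []) v 0 (by omega) (by omega)]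
        rw [pySetD_wrap (R1.getD k []) v _ (by rw [hR1row]; omega) (by rw [hR1row]; omega)]
        rw [show wrapIdx (R1.getD k []).length v = wrapIdx (T.getD k []).length v from by
              rw [hR1row]]
        rw [pySetD_wrap R1 _ _ (by rw [hR1len]; omega) (by rw [hR1len]; omega), hwk]
      rw [hstep]
      set ck := wrapIdx (T.getD k []).length v with hckdef
      set R1 := R.set w ((R.getD w []).set k (1 - (T.getD w []).getD k 0)) with hR1
      have hR1len : R1.length = T.length := by rw [hR1, List.length_set, ih1]
      set M2 := R1.set k ((R1.getD k []).set ck (1 - (T.getD k []).getD ck 0)) with hM2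
      have hM2len : M2.length = T.length := by rw [hM2, List.length_set, hR1len]
      have hR1row : ∀ i, (R1.getD i []).length = (T.getD i []).length := by
        intro i
        rw [hR1, getD_set_of_lt _ _ _ _ _ (by rw [ih1]; omega)]
        by_cases h : i = w
        · rw [if_pos h, List.length_set, ih2 w, h]
        · rw [if_neg h]; exact ih2 i
      have hM2row : ∀ i, (M2.getD i []).length = (T.getD i []).length := by
        intro i
        rw [hM2, getD_set_of_lt _ _ _ _ _ (by rw [hR1len]; omega)]
        by_cases h : i = k
        · rw [if_pos h, List.length_set, hR1row k, h]
        · rw [if_neg h]; exact hR1row i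
      refine ⟨hM2len, hM2row, ?_⟩
      have hckb : ck < (T.getD k []).length := by
        rw [hckdef]
        unfold wrapIdx
        rw [if_neg (by omega)]
        have := hcols k hkn
        omega
      unfold cellD
      rw [hM2, getD_set_of_lt _ _ _ _ _ (by rw [hR1len]; omega)]
      by_cases hwkk : w = k
      · rw [if_pos hwkk]
        have hRw : R1.getD k [] = (R.getD w []).set k (1 - (T.getD w []).getD k 0) := by
          rw [hR1, getD_set_of_lt _ _ _ _ _ (by rw [ih1]; omega), if_pos hwkk.symm]
        rw [hRw]
        by_cases hcw : ck = w
        · rw [getD_set_of_lt _ _ _ _ _ (by rw [List.length_set, ih2 w, hwkk]; exact hckb),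
              if_pos hcw.symm, ← hwkk, hcw]
          rw [if_pos (by omega)]
        · rw [getD_set_of_lt _ _ _ _ _ (by rw [List.length_set, ih2 w, hwkk]; exact hckb),
              if_neg (fun h => hcw (h.symm))]
          rw [getD_set_of_lt _ _ _ _ _ (by rw [ih2 w]; omega), if_pos hwkk, ← hwkk]
          rw [if_pos (by omega)]
      · rw [if_neg hwkk]
        rw [hR1, getD_set_of_lt _ _ _ _ _ (by rw [ih1]; omega)]
        by_cases hww : w = w
        · rw [if_pos hww]
          rw [getD_set_of_lt _ _ _ _ _ (by rw [ih2 w]; omega), if_neg hwkk]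
          have := ih3
          unfold cellD at this
          rw [this]
          exact if_congr (by omega) rfl rfl
        · exact absurd rfl hww
  obtain ⟨h1, h2, h3⟩ := main T.length le_rfl
  exact ⟨h1, h2, h3⟩

-- Characterisation of port B on a nonempty matrix with an in-range vertex index.
theorem pyGet_range_wrap (n : Nat) (v : Int) (hn : 0 < n)
    (h1 : -(n : Int) ≤ v) (h2 : v < (n : Int)) :
    PySem.List.pyGet? (PySem.List.pyRange 0 (n : Int) 1) v
      = some ((wrapIdx n v : Nat) : Int) := by
  unfold PySem.List.pyGet? PySem.List.pyIdx? wrapIdx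
  rw [PySem.List.length_pyRange_one]
  by_cases h : 0 ≤ v
  · rw [if_pos h, if_pos (by omega)]
    simp only [Option.bind_some]
    rw [List.getElem?_eq_getElem (by rw [PySem.List.length_pyRange_one]; omega)]
    rw [PySem.List.getElem_pyRange_one]
    simp [h]
  · rw [if_neg h, if_pos (by omega)]
    simp only [Option.bind_some]
    rw [List.getElem?_eq_getElem (by rw [PySem.List.length_pyRange_one]; omega)]
    rw [PySem.List.getElem_pyRange_one]
    simp only [Option.some.injEq, if_neg h]
    omega

theorem B_char (T : List (List Int)) (v : Int) (hn : 0 < T.length)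
    (h1 : -(T.length : Int) ≤ v) (h2 : v < (T.length : Int)) :
    (cut_flip_vertex_alt T v).length = T.length ∧
    (∀ i, ((cut_flip_vertex_alt T v).getD i []).length = (T.getD i []).length) ∧
    (∀ i j, i < T.length → j < (T.getD i []).length →
      cellD (cut_flip_vertex_alt T v) i j
        = if (((i : Int) = ((wrapIdx T.length v : Nat) : Int))
              ↔ ((j : Int) = ((wrapIdx T.length v : Nat) : Int)))
          then cellD T i j else 1 - cellD T i j) := by
  set w : Int := ((wrapIdx T.length v : Nat) : Int) with hw
  have hB : cut_flip_vertex_alt T v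
      = ((PySem.List.enumerate T 0).map (fun ir =>
          if ir.1 == w then ir.2.map (fun x => 1 - x) else ir.2)).map
        (fun row => (PySem.List.enumerate row 0).map (fun jx =>
          if jx.1 == w then 1 - jx.2 else jx.2)) := by
    simp only [cut_flip_vertex_alt]
    rw [if_neg (by omega), pyGet_range_wrap T.length v hn h1 h2]
  rw [hB]
  set rows := (PySem.List.enumerate T 0).map (fun ir =>
      if ir.1 == w then ir.2.map (fun x => 1 - x) else ir.2) with hrows
  have hrlen : rows.length = T.length := by
    simp [hrows, PySem.List.length_enumerate]
  have hri : ∀ i, i < T.length →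
      rows.getD i [] = if (i : Int) = w then (T.getD i []).map (fun x => 1 - x)
                       else T.getD i [] := by
    intro i hi
    rw [List.getD_eq_getElem _ _ (show i < rows.length by omega),
        List.getD_eq_getElem _ _ hi]
    simp [hrows, PySem.List.getElem_enumerate]
  have hout : ∀ i, i < T.length →
      ((rows.map (fun row => (PySem.List.enumerate row 0).map (fun jx =>
          if jx.1 == w then 1 - jx.2 else jx.2))).getD i [])
        = (PySem.List.enumerate (rows.getD i []) 0).map (fun jx =>
            if jx.1 == w then 1 - jx.2 else jx.2) := by
    intro i hi
    rw [List.getD_eq_getElem _ _ (by simp [hrlen]; omega),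
        List.getD_eq_getElem _ _ (by omega : i < rows.length)]
    simp
  refine ⟨by simp [hrlen], ?_, ?_⟩
  · intro i
    by_cases hi : i < T.length
    · rw [hout i hi]
      rw [hri i hi]
      by_cases h : (i : Int) = w <;>
        simp [h, PySem.List.length_enumerate]
    · rw [List.getD_eq_default _ _ (by simp [hrlen]; omega),
          List.getD_eq_default _ _ (by omega)]
  · intro i j hi hj
    unfold cellD
    rw [hout i hi, hri i hi]
    have hjr : j < (if (i : Int) = w then (T.getD i []).map (fun x => 1 - x)
                    else T.getD i []).length := by
      split_ifs <;> simpa using hj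
    rw [List.getD_eq_getElem _ _ (by
          simpa [PySem.List.length_enumerate] using hjr),
        List.getD_eq_getElem _ _ hj]
    simp only [List.getElem_map, PySem.List.getElem_enumerate]
    by_cases h1 : (i : Int) = w <;> by_cases h2 : (j : Int) = w <;>
      simp [h1, h2, List.getElem_map]

theorem A_empty (v : Int) : cut_flip_vertex [] v = [] := by
  simp [cut_flip_vertex]

theorem B_empty (v : Int) : cut_flip_vertex_alt [] v = [] := by
  simp [cut_flip_vertex_alt]

-- ===== VERDICT (by name: the statement is the Claim_ definition above) =====
theorem cut_flip_vertex_spec : Claim_unchanged_cut_flip_vertex := by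
  unfold Claim_unchanged_cut_flip_vertex Spec_cut_flip_vertex
  intro T v _ hpre hnd
  rcases hpre with hT | ⟨hv0, hvn, hio⟩ | ⟨hlo, hneg, _⟩
  · subst hT; rw [A_empty, B_empty]
  · have hn : 0 < T.length := by omega
    have hne : T ≠ [] := List.ne_nil_of_length_pos hn
    set w : Nat := v.toNat with hwdef
    have hv : v = (w : Int) := by omega
    have hw : w < T.length := by omega
    have hrv : ∀ u, u < T.length → ¬ u = w → u < (T.getD w []).length := by
      intro u hu huw
      exact (hio u hu (by omega)).1
    have hcol : ∀ i, i < T.length → ¬ i = w → w < (T.getD i []).length := by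
      intro i hi hiw
      have := (hio i hi (by omega)).2
      omega
    have hle : (T.getD w []).length ≤ T.length := by
      by_contra h
      exact hnd ⟨hne, Or.inr ⟨hv0, hvn, by rw [← hwdef]; omega⟩⟩
    obtain ⟨a1, a2, a3⟩ := A_char2 T v w hv hw hrv hcol hle
    obtain ⟨b1, b2, b3⟩ := B_char T v hn (by omega) hvn
    have hwv : ((wrapIdx T.length v : Nat) : Int) = ((w : Nat) : Int) := by
      unfold wrapIdx
      rw [if_pos hv0]
    apply List.ext_getElem (by rw [a1, b1])
    intro i h1 h2
    have hi : i < T.length := by rw [a1] at h1; exact h1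
    apply List.ext_getElem
    · rw [← List.getD_eq_getElem _ ([] : List Int) h1, ← List.getD_eq_getElem _ ([] : List Int) h2,
         a2 i, b2 i]
    · intro j hj1 hj2
      have hjT : j < (T.getD i []).length := by
        rw [← List.getD_eq_getElem _ ([] : List Int) h1, a2 i] at hj1; exact hj1
      have hc1 : (cut_flip_vertex T v)[i][j] = cellD (cut_flip_vertex T v) i j := by
        unfold cellD
        rw [List.getD_eq_getElem _ ([] : List Int) h1,
            List.getD_eq_getElem _ (0 : Int) hj1]
      have hc2 : (cut_flip_vertex_alt T v)[i][j] = cellD (cut_flip_vertex_alt T v) i j := by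
        unfold cellD
        rw [List.getD_eq_getElem _ ([] : List Int) h2,
            List.getD_eq_getElem _ (0 : Int) hj2]
      rw [hc1, hc2, a3 i j hi hjT, b3 i j hi hjT, hwv]
      have e1 : ((i : Nat) : Int) = ((w : Nat) : Int) ↔ i = w := by omega
      have e2 : ((j : Nat) : Int) = ((w : Nat) : Int) ↔ j = w := by omega
      split_ifs <;> omega
  · have hn : 0 < T.length := by omega
    have hne : T ≠ [] := List.ne_nil_of_length_pos hn
    exact absurd ⟨hne, Or.inl ⟨hlo, hneg⟩⟩ hnd
theorem cut_flip_vertex_changed : Claim_changed_cut_flip_vertex := by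
  unfold Claim_changed_cut_flip_vertex; decide
theorem cut_flip_vertex_tight : Claim_exact_cut_flip_vertex := by
  unfold Claim_exact_cut_flip_vertex
  intro T v _ hpre hd heq
  obtain ⟨hne, hd2⟩ := hd
  have hn : 0 < T.length := List.length_pos_iff.mpr hne
  rcases hd2 with ⟨hlo, hneg⟩ | ⟨hv0, hvn, hlong⟩
  · -- negative v: A flips the diagonal entry, B does not
    obtain ⟨hrow⟩ : Nonempty (∀ u, u < T.length →
        (u < (T.getD (v + T.length).toNat []).length ∧ -v ≤ ((T.getD u []).length : Int))) := by
      rcases hpre with hT | ⟨h0, _⟩ | ⟨_, _, h⟩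
      · exact absurd hT hne
      · omega
      · exact ⟨h⟩
    set w : Nat := (v + T.length).toNat with hwdef
    have hv : ((w : Nat) : Int) = v + T.length := by omega
    have hw : w < T.length := by omega
    have hLw : T.length ≤ (T.getD w []).length := by
      have := (hrow (T.length - 1) (by omega)).1
      omega
    have hcols : ∀ u, u < T.length → -v ≤ ((T.getD u []).length : Int) :=
      fun u hu => (hrow u hu).2
    obtain ⟨a1, a2, a3⟩ := A_diag T v w hlo hneg hv hw hLw hcols
    obtain ⟨b1, b2, b3⟩ := B_char T v hn hlo (by omega)
    have hwT : w < (T.getD w []).length := by omega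
    have hB : cellD (cut_flip_vertex_alt T v) w w = cellD T w w := by
      rw [b3 w w hw hwT, if_pos Iff.rfl]
    have hA : cellD (cut_flip_vertex T v) w w = 1 - cellD T w w := by
      rw [a3, if_pos hw]
    rw [heq, hB] at hA
    omega
  · -- nonnegative v with an over-long v-th row: A leaves column len(T) of it unchanged
    set w : Nat := v.toNat with hwdef
    have hv : v = (w : Int) := by omega
    have hw : w < T.length := by omega
    obtain ⟨hio⟩ : Nonempty (∀ u : Nat, u < T.length → (u : Int) ≠ v →
        (u < (T.getD v.toNat []).length ∧ v < ((T.getD u []).length : Int))) := by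
      rcases hpre with hT | ⟨_, _, h⟩ | ⟨_, h0, _⟩
      · exact absurd hT hne
      · exact ⟨h⟩
      · omega
    have hrv : ∀ u, u < T.length → ¬ u = w → u < (T.getD w []).length := by
      intro u hu huw
      exact (hio u hu (by omega)).1
    have hcol : ∀ i, i < T.length → ¬ i = w → w < (T.getD i []).length := by
      intro i hi hiw
      have := (hio i hi (by omega)).2
      omega
    have hA0 : cut_flip_vertex T v
        = ((List.range T.length).map (fun j => ((j : Nat) : Int))).foldl (flipStep T v) T := by
      simp only [cut_flip_vertex]
      rw [PySem.List.pyRange_one]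
      simp [List.map_id']
    obtain ⟨a1, a2, a3⟩ := A_inv2 T v w hv hw hrv hcol T.length le_rfl
    obtain ⟨b1, b2, b3⟩ := B_char T v hn (by omega) hvn
    rw [← hA0] at a1 a2 a3
    have hjn : T.length < (T.getD w []).length := hlong
    have hA : cellD (cut_flip_vertex T v) w T.length = cellD T w T.length := by
      rw [a3 w T.length hw hjn, if_neg (by omega)]
    have hB : cellD (cut_flip_vertex_alt T v) w T.length = 1 - cellD T w T.length := by
      rw [b3 w T.length hw hjn]
      rw [if_neg (by
        unfold wrapIdx
        rw [if_pos (by omega)]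
        omega)]
    rw [heq, hB] at hA
    omega
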